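-- pv_equiv track=rewrite | github.com/Idir6380/pstal-morphtagger | src/data_preparation.py | encode_sent_morphs
-- ===== SOURCE A (Python) =====
-- def encode_sent_morphs(sent, trait_vocabs):
--
--     NA_ID = 1
--
--     encoded = {trait_name : [] for trait_name in trait_vocabs}
--
--     for token in sent:
--         feats = token['feats']
--
--         for trait_name, vocab in trait_vocabs.items():
--             if feats and trait_name in feats:
--                 value = feats[trait_name]
--                 encoded[trait_name].append(vocab.get(value, NA_ID))
--             else:
--                 encoded[trait_name].append(NA_ID)
--
--     return encoded
-- ===== SOURCE B (Python) =====
-- def encode_sent_morphs(sent, trait_vocabs):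
--     NA_ID = 1
--     n = len(sent)
--     # pre-fill every trait row with NA, then scatter-write only the traits
--     # each token actually carries (iterate feats, not trait_vocabs)
--     result = {trait_name: [NA_ID] * n for trait_name in trait_vocabs}
--     for i, token in enumerate(sent):
--         feats = token['feats']
--         if feats:
--             for trait_name, value in feats.items():
--                 vocab = trait_vocabs.get(trait_name)
--                 if vocab is not None:
--                     result[trait_name][i] = vocab.get(value, NA_ID)
--     return result
-- ===== Notes on version B (the rewrite author's own statement) =====
-- stated objective: alternative
-- what changed: B replaces A's dense gather (for every token, loop over ALL traits and append hit-or-NA) by a scatter: it pre-fills every trait row with NA_ID for the whole sentence, then iterates each token's own feats entries only, overwriting result[trait][i] for traits that both appear in the feats and in trait_vocabs - the per-(token,trait) membership test disappears and work is proportional to the feats actually present.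
import Mathlib
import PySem

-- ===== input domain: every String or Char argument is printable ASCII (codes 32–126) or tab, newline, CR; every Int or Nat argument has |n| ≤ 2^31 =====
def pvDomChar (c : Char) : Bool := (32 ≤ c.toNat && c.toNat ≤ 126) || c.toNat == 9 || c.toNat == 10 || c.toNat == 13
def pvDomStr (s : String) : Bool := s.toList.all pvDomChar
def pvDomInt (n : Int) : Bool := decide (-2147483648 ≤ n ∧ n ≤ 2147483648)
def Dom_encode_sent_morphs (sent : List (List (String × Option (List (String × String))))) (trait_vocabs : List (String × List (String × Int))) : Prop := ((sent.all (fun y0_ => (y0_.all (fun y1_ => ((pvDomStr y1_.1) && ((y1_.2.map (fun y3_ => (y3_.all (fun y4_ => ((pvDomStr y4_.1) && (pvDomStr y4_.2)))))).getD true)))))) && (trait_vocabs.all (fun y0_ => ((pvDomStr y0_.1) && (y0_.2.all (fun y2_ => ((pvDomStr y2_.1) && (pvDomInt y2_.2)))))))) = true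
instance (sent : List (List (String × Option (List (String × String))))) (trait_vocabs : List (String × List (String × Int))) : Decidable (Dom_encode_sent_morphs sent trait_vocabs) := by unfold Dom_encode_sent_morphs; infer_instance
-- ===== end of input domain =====

-- B replaces A's dense per-token loop over all traits by a scatter: NA-prefilled rows, then an overwrite at position i only for the traits each token's feats actually carries.
-- Pre_ excludes sentences with a token lacking the 'feats' key, on which both A and B raise KeyError.


-- ===== PORT A =====
-- the per-(token,trait) value 'vocab.get(feats[trait], NA_ID) if (feats and trait in feats) else NA_ID'
def pvEncVal (feats : Option (List (String × String))) (trait : String) (vocab : List (String × Int)) : Int :=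
  match feats with
  | none => 1
  | some f =>
    let fd := PySem.Dict.ofList f
    if fd.size != 0 && fd.contains trait then
      (PySem.Dict.ofList vocab).getD (fd.getD trait "") 1
    else 1

-- token['feats'] (KeyError if absent is excluded by Pre_; getD none is exact on Pre_)
def pvFeats (token : List (String × Option (List (String × String)))) : Option (List (String × String)) :=
  (PySem.Dict.ofList token).getD "feats" none

def encode_sent_morphs (sent : List (List (String × Option (List (String × String))))) (trait_vocabs : List (String × List (String × Int))) : List (String × List Int) :=
  let tv := PySem.Dict.ofList trait_vocabs
  -- encoded = {trait_name: [] for trait_name in trait_vocabs}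
  let enc0 : PySem.Dict String (List Int) :=
    PySem.Dict.ofList (tv.items.map (fun p => (p.1, ([] : List Int))))
  -- for token in sent: for trait_name, vocab in trait_vocabs.items(): encoded[trait_name].append(…)
  let encF := sent.foldl (fun enc token =>
      let feats := pvFeats token
      tv.items.foldl (fun enc p =>
        enc.modify p.1 [] (fun xs => xs ++ [pvEncVal feats p.1 p.2])) enc) enc0
  encF.items

-- ===== PORT B =====
-- one token of the scatter loop: if feats (truthy), for trait_name, value in feats.items():
--   vocab = trait_vocabs.get(trait_name); if vocab is not None: result[trait_name][i] = vocab.get(value, NA_ID)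
def pvStepB (tv : PySem.Dict String (List (String × Int))) (i : Nat)
    (token : List (String × Option (List (String × String))))
    (res : PySem.Dict String (List Int)) : PySem.Dict String (List Int) :=
  match pvFeats token with
  | none => res
  | some f =>
    let fd := PySem.Dict.ofList f
    if fd.size != 0 then
      fd.items.foldl (fun res p =>
        match tv.get? p.1 with
        | some vocab => res.modify p.1 [] (fun xs => xs.set i ((PySem.Dict.ofList vocab).getD p.2 1))
        | none => res) res
    else res

-- for i, token in enumerate(sent): … (index carried through the recursion)
def pvScatterB (tv : PySem.Dict String (List (String × Int))) (i : Nat)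
    (toks : List (List (String × Option (List (String × String)))))
    (res : PySem.Dict String (List Int)) : PySem.Dict String (List Int) :=
  match toks with
  | [] => res
  | t :: rest => pvScatterB tv (i + 1) rest (pvStepB tv i t res)

def encode_sent_morphs_alt (sent : List (List (String × Option (List (String × String))))) (trait_vocabs : List (String × List (String × Int))) : List (String × List Int) :=
  let tv := PySem.Dict.ofList trait_vocabs
  -- result = {trait_name: [NA_ID] * n for trait_name in trait_vocabs}
  let res0 : PySem.Dict String (List Int) :=
    PySem.Dict.ofList (tv.items.map (fun p => (p.1, List.replicate sent.length (1 : Int))))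
  (pvScatterB tv 0 sent res0).items

-- ===== PRECONDITION & SPEC =====
-- Pre_ excludes sentences with a token lacking the 'feats' key: there token['feats'] raises KeyError in A (and in B).
def Pre_encode_sent_morphs (sent : List (List (String × Option (List (String × String))))) (trait_vocabs : List (String × List (String × Int))) : Prop :=
  sent.all (fun token => token.any (fun p => p.1 == "feats")) = true
instance (sent : List (List (String × Option (List (String × String))))) (trait_vocabs : List (String × List (String × Int))) : Decidable (Pre_encode_sent_morphs sent trait_vocabs) := by unfold Pre_encode_sent_morphs; infer_instance

def pvWitness_encode_sent_morphs : (List (List (String × Option (List (String × String))))) × (List (String × List (String × Int))) :=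
  ([[("feats", some [("Gender", "Fem")])], [("feats", none)]],
   [("Gender", [("Fem", 3), ("Masc", 4)]), ("Number", [("Sing", 2)])])

def Spec_encode_sent_morphs (sent : List (List (String × Option (List (String × String))))) (trait_vocabs : List (String × List (String × Int))) (out : List (String × List Int)) : Prop := out = encode_sent_morphs_alt sent trait_vocabs
instance (sent : List (List (String × Option (List (String × String))))) (trait_vocabs : List (String × List (String × Int))) (out : List (String × List Int)) : Decidable (Spec_encode_sent_morphs sent trait_vocabs out) := by unfold Spec_encode_sent_morphs; infer_instance

-- ===== CLAIM (what is proved, stated in full; the proofs are below) =====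
def Claim_equal_encode_sent_morphs : Prop := ∀ (sent : List (List (String × Option (List (String × String))))) (trait_vocabs : List (String × List (String × Int))), Dom_encode_sent_morphs sent trait_vocabs → Pre_encode_sent_morphs sent trait_vocabs → Spec_encode_sent_morphs sent trait_vocabs (encode_sent_morphs sent trait_vocabs)

-- ===== LEMMAS AND PROOFS =====

-- ---------- A side: each trait's row accumulates one value per token ----------

-- filtering a keyed map of a Nodup-keyed list at one of its keys picks exactly that pair
theorem pv_filter_map_fst {β : Type} (K : List (String × List (String × Int)))
    (h : String × List (String × Int) → β) (pk : String × List (String × Int))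
    (hmem : pk ∈ K) (hnd : (K.map (fun q => q.1)).Nodup) :
    (K.map (fun q => (q.1, h q))).filter (fun y => y.1 == pk.1) = [(pk.1, h pk)] := by
  induction K with
  | nil => cases hmem
  | cons a K ih =>
    simp only [List.map_cons, List.nodup_cons] at hnd
    rcases hnd with ⟨hna, hnd⟩
    rcases List.mem_cons.mp hmem with h1 | h2
    · subst h1
      simp only [List.map_cons, List.filter_cons]
      rw [show (pk.1 == pk.1) = true by simp]
      have hnone : ∀ y ∈ K.map (fun q => (q.1, h q)), ¬ (y.1 == pk.1) = true := by
        intro y hy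
        rcases List.mem_map.mp hy with ⟨q, hq, rfl⟩
        simp only [beq_iff_eq]
        intro hcontra
        exact hna (hcontra ▸ List.mem_map_of_mem hq)
      simp [List.filter_eq_nil_iff.mpr hnone]
    · simp only [List.map_cons, List.filter_cons]
      have : (a.1 == pk.1) = false := by
        simp only [beq_eq_false_iff_ne]
        intro hcontra
        exact hna (hcontra ▸ List.mem_map_of_mem h2)
      rw [this]
      exact ih h2 hnd

-- the inner trait loop appends exactly one value at each trait key
theorem pv_inner_getD (K : List (String × List (String × Int)))
    (enc : PySem.Dict String (List Int))
    (g : String × List (String × Int) → Int)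
    (pk : String × List (String × Int))
    (hmem : pk ∈ K) (hnd : (K.map (fun q => q.1)).Nodup) :
    (K.foldl (fun enc p => enc.modify p.1 [] (fun xs => xs ++ [g p])) enc).getD pk.1 []
      = enc.getD pk.1 [] ++ [g pk] := by
  have hrw : K.foldl (fun enc p => enc.modify p.1 [] (fun xs => xs ++ [g p])) enc
      = (K.map (fun p => (p.1, g p))).foldl (fun d q => d.modify q.1 [] (fun xs => xs ++ [q.2])) enc := by
    rw [List.foldl_map]
  rw [hrw, PySem.Dict.getD_foldl_modify_append,
      pv_filter_map_fst K g pk hmem hnd]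
  simp

-- the inner trait loop does not change the key list when all trait keys are already present
theorem pv_inner_keys (K : List (String × List (String × Int)))
    (enc : PySem.Dict String (List Int))
    (g : String × List (String × Int) → Int)
    (hsub : ∀ p ∈ K, p.1 ∈ enc.keys) :
    (K.foldl (fun enc p => enc.modify p.1 [] (fun xs => xs ++ [g p])) enc).keys = enc.keys := by
  rw [PySem.Dict.keys_foldl_modify_key K (fun p => p.1) [] (fun _ p xs => xs ++ [g p]) enc]
  rw [PySem.Set.update_eq_append_filter]
  have hall : ∀ y ∈ PySem.Set.ofList (K.map (fun p => p.1)), ¬ (!PySem.Set.contains enc.keys y) = true := by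
    intro y hy
    have hy' : y ∈ K.map (fun p => p.1) := (PySem.Set.mem_ofList _ _).mp hy
    rcases List.mem_map.mp hy' with ⟨p, hp, rfl⟩
    simp [PySem.Set.contains, hsub p hp]
  rw [List.filter_eq_nil_iff.mpr hall]
  simp

-- the sentence loop: getD at a trait key accumulates one value per token
theorem pv_sent_getD (sent : List (List (String × Option (List (String × String)))))
    (K : List (String × List (String × Int)))
    (enc : PySem.Dict String (List Int))
    (pk : String × List (String × Int))
    (hmem : pk ∈ K) (hnd : (K.map (fun q => q.1)).Nodup) :
    (sent.foldl (fun enc token =>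
        K.foldl (fun enc p => enc.modify p.1 [] (fun xs => xs ++ [pvEncVal (pvFeats token) p.1 p.2])) enc) enc).getD pk.1 []
      = enc.getD pk.1 [] ++ sent.map (fun token => pvEncVal (pvFeats token) pk.1 pk.2) := by
  induction sent generalizing enc with
  | nil => simp
  | cons t sent ih =>
    simp only [List.foldl_cons, List.map_cons]
    rw [ih, pv_inner_getD K enc (fun p => pvEncVal (pvFeats t) p.1 p.2) pk hmem hnd]
    simp

-- the sentence loop never changes the key list
theorem pv_sent_keys (sent : List (List (String × Option (List (String × String)))))
    (K : List (String × List (String × Int)))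
    (enc : PySem.Dict String (List Int))
    (hsub : ∀ p ∈ K, p.1 ∈ enc.keys) :
    (sent.foldl (fun enc token =>
        K.foldl (fun enc p => enc.modify p.1 [] (fun xs => xs ++ [pvEncVal (pvFeats token) p.1 p.2])) enc) enc).keys = enc.keys := by
  induction sent generalizing enc with
  | nil => rfl
  | cons t sent ih =>
    simp only [List.foldl_cons]
    rw [ih]
    · exact pv_inner_keys K enc _ hsub
    · intro p hp
      rw [pv_inner_keys K enc _ hsub]
      exact hsub p hp

-- the initial {trait: …} comprehensions: items of ofList over fresh distinct keys
theorem pv_init_items (K : List (String × List (String × Int)))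
    (v : String × List (String × Int) → List Int)
    (hnd : (K.map (fun q => q.1)).Nodup) :
    (PySem.Dict.ofList (K.map (fun p => (p.1, v p)))).items = K.map (fun p => (p.1, v p)) := by
  have := PySem.Dict.items_foldl_insert_fresh (K.map (fun p => (p.1, v p)))
    (fun a => a.1) (fun a => a.2) PySem.Dict.empty
    (by intro a _; exact PySem.Dict.contains_empty a.1)
    (by simpa [List.map_map, Function.comp] using hnd)
  simp only [PySem.Dict.ofList, PySem.Dict.update] at *
  rw [show (fun (acc : PySem.Dict String (List Int)) (p : String × List Int) => acc.insert p.1 p.2)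
        = (fun (d : PySem.Dict String (List Int)) (a : String × List Int) => d.insert a.1 a.2) from rfl]
  rw [this]
  simp [List.map_map, Function.comp, PySem.Dict.empty]

-- ---------- B side: the scatter fills each row position by position ----------

-- setting the element right after a prefix
theorem pv_set_append (P : List Int) (a b : Int) (Q : List Int) :
    (P ++ a :: Q).set P.length b = P ++ b :: Q := by
  induction P with
  | nil => rfl
  | cons x P ih => simp only [List.cons_append, List.length_cons, List.set_cons_succ, ih]

-- the inner feats loop, watched at one trait row, is a fold on that row alone
theorem pv_innerB_row (tv : PySem.Dict String (List (String × Int))) (i : Nat)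
    (pk : String × List (String × Int)) (hget : tv.get? pk.1 = some pk.2)
    (l : List (String × String)) (res : PySem.Dict String (List Int)) :
    (l.foldl (fun res p =>
        match tv.get? p.1 with
        | some vocab => res.modify p.1 [] (fun xs => xs.set i ((PySem.Dict.ofList vocab).getD p.2 1))
        | none => res) res).getD pk.1 []
      = l.foldl (fun xs p =>
          if p.1 = pk.1 then xs.set i ((PySem.Dict.ofList pk.2).getD p.2 1) else xs)
          (res.getD pk.1 []) := by
  induction l generalizing res with
  | nil => rfl
  | cons p l ih =>
    simp only [List.foldl_cons]
    by_cases hp : p.1 = pk.1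
    · rw [if_pos hp, hp, hget, ih]
      dsimp only
      rw [PySem.Dict.getD_modify_self]
    · rw [if_neg hp]
      cases hv : tv.get? p.1 with
      | none => rw [ih]
      | some vocab =>
        rw [ih]
        dsimp only
        rw [PySem.Dict.getD_modify_of_ne _ _ _ (fun h => hp h.symm)]

-- a row-fold over pairs none of which carry the watched key does nothing
theorem pv_rowfold_absent (i : Nat) (pk : String × List (String × Int))
    (l : List (String × String)) (xs : List Int)
    (hno : ∀ p ∈ l, p.1 ≠ pk.1) :
    l.foldl (fun xs p =>
        if p.1 = pk.1 then xs.set i ((PySem.Dict.ofList pk.2).getD p.2 1) else xs) xs = xs := by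
  induction l generalizing xs with
  | nil => rfl
  | cons p l ih =>
    simp only [List.foldl_cons]
    rw [if_neg (hno p (List.mem_cons_self))]
    exact ih xs (fun q hq => hno q (List.mem_cons_of_mem p hq))

-- one scatter step rewrites exactly position i of the watched row to the A-side value
theorem pv_stepB_row (tv : PySem.Dict String (List (String × Int))) (i : Nat)
    (t : List (String × Option (List (String × String))))
    (res : PySem.Dict String (List Int))
    (pk : String × List (String × Int)) (hget : tv.get? pk.1 = some pk.2)
    (P Q : List Int) (hrow : res.getD pk.1 [] = P ++ (1 : Int) :: Q) (hi : P.length = i) :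
    (pvStepB tv i t res).getD pk.1 [] = P ++ pvEncVal (pvFeats t) pk.1 pk.2 :: Q := by
  unfold pvStepB pvEncVal
  cases hf : pvFeats t with
  | none => exact hrow
  | some f =>
    simp only
    set fd := PySem.Dict.ofList f with hfd
    by_cases hsz : fd.size != 0
    · rw [if_pos hsz, pv_innerB_row tv i pk hget _ res, hrow]
      have hndf : fd.keys.Nodup := hfd ▸ PySem.Dict.nodup_keys_ofList f
      by_cases hc : fd.contains pk.1
      · -- the watched trait occurs in this token's feats: one set at position i
        have hg : fd.get? pk.1 = some (fd.getD pk.1 "") := by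
          cases hgg : fd.get? pk.1 with
          | none =>
            exfalso
            rw [PySem.Dict.contains_eq_isSome_get?, hgg] at hc
            exact Bool.false_ne_true hc
          | some w =>
            rw [PySem.Dict.getD_of_get?_eq_some fd "" hgg]
        have hmem : (pk.1, fd.getD pk.1 "") ∈ fd.items :=
          PySem.Dict.mem_items_of_get?_eq_some _ hg
        rcases List.append_of_mem hmem with ⟨l1, l2, hsplit⟩
        have hndsplit : ((l1 ++ (pk.1, fd.getD pk.1 "") :: l2).map (fun q => q.1)).Nodup := by
          rw [← hsplit]; exact hndf
        simp only [List.map_append, List.map_cons, List.nodup_append, List.nodup_cons] at hndsplit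
        rcases hndsplit with ⟨hnd1, ⟨hnk2, _⟩, hdisj⟩
        have hno1 : ∀ p ∈ l1, p.1 ≠ pk.1 := by
          intro p hp hcontra
          exact hdisj _ (List.mem_map_of_mem hp) _ List.mem_cons_self hcontra
        have hno2 : ∀ p ∈ l2, p.1 ≠ pk.1 := by
          intro p hp hcontra
          exact hnk2 (hcontra ▸ List.mem_map_of_mem hp)
        rw [hsplit, List.foldl_append, pv_rowfold_absent i pk l1 _ hno1]
        simp only [List.foldl_cons]
        rw [pv_rowfold_absent i pk l2 _ hno2, ← hi, pv_set_append]
        simp [hsz, hc]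
      · -- the watched trait is absent from this token's feats: row untouched, value is NA
        have hno : ∀ p ∈ fd.items, p.1 ≠ pk.1 := by
          intro p hp hcontra
          have : p.1 ∈ fd.keys := List.mem_map_of_mem hp
          rw [hcontra] at this
          exact hc ((PySem.Dict.contains_iff_mem_keys fd pk.1).mpr this)
        rw [pv_rowfold_absent i pk fd.items _ hno]
        simp only [Bool.not_eq_true] at hc
        simp [hc]
    · rw [if_neg hsz]
      simp only [Bool.not_eq_true] at hsz
      simpa [hsz] using hrow

-- the scatter loop turns the NA-prefilled suffix into the per-token values, one per step
theorem pv_scatterB_row (tv : PySem.Dict String (List (String × Int)))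
    (pk : String × List (String × Int)) (hget : tv.get? pk.1 = some pk.2)
    (toks : List (List (String × Option (List (String × String)))))
    (res : PySem.Dict String (List Int)) (P : List Int)
    (hrow : res.getD pk.1 [] = P ++ List.replicate toks.length (1 : Int)) :
    (pvScatterB tv P.length toks res).getD pk.1 []
      = P ++ toks.map (fun t => pvEncVal (pvFeats t) pk.1 pk.2) := by
  induction toks generalizing res P with
  | nil => simpa using hrow
  | cons t rest ih =>
    simp only [pvScatterB, List.map_cons]
    have hrow' : res.getD pk.1 [] = P ++ (1 : Int) :: List.replicate rest.length 1 := by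
      simpa [List.replicate_succ] using hrow
    have hstep := pv_stepB_row tv P.length t res pk hget P (List.replicate rest.length 1) hrow' rfl
    have := ih (pvStepB tv P.length t res) (P ++ [pvEncVal (pvFeats t) pk.1 pk.2])
      (by simpa using hstep)
    simpa [List.length_append] using this

-- one scatter step never changes the key list when every trait_vocabs key is present
theorem pv_stepB_keys (tv : PySem.Dict String (List (String × Int))) (i : Nat)
    (t : List (String × Option (List (String × String))))
    (res : PySem.Dict String (List Int))
    (hsub : ∀ k, tv.contains k = true → k ∈ res.keys) :
    (pvStepB tv i t res).keys = res.keys := by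
  unfold pvStepB
  cases pvFeats t with
  | none => rfl
  | some f =>
    simp only
    by_cases hsz : (PySem.Dict.ofList f).size != 0
    · rw [if_pos hsz]
      generalize (PySem.Dict.ofList f).items = l
      induction l generalizing res with
      | nil => rfl
      | cons p l ih =>
        simp only [List.foldl_cons]
        cases hv : tv.get? p.1 with
        | none => exact ih res hsub
        | some vocab =>
          have hcp : tv.contains p.1 = true := by
            rw [PySem.Dict.contains_eq_isSome_get?, hv]; rfl
          have hkeys : (res.modify p.1 [] (fun xs => xs.set i ((PySem.Dict.ofList vocab).getD p.2 1))).keys = res.keys := by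
            rw [PySem.Dict.keys_modify]
            exact PySem.Dict.keys_insert_of_contains res _
              ((PySem.Dict.contains_iff_mem_keys res p.1).mpr (hsub p.1 hcp))
          rw [ih _ (fun k hk => hkeys ▸ hsub k hk), hkeys]
    · rw [if_neg hsz]

-- the whole scatter never changes the key list
theorem pv_scatterB_keys (tv : PySem.Dict String (List (String × Int))) (i : Nat)
    (toks : List (List (String × Option (List (String × String)))))
    (res : PySem.Dict String (List Int))
    (hsub : ∀ k, tv.contains k = true → k ∈ res.keys) :
    (pvScatterB tv i toks res).keys = res.keys := by
  induction toks generalizing i res with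
  | nil => rfl
  | cons t rest ih =>
    simp only [pvScatterB]
    have hk := pv_stepB_keys tv i t res hsub
    rw [ih (i + 1) _ (fun k hc => hk ▸ hsub k hc), hk]

-- both ports' rows over the SAME target: A.items = T and B.items = T
theorem pv_ports_eq (sent : List (List (String × Option (List (String × String)))))
    (trait_vocabs : List (String × List (String × Int))) :
    encode_sent_morphs sent trait_vocabs = encode_sent_morphs_alt sent trait_vocabs := by
  unfold encode_sent_morphs encode_sent_morphs_alt
  set tv := PySem.Dict.ofList trait_vocabs with htv
  set K := tv.items with hK
  have hndK : (K.map (fun q => q.1)).Nodup := by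
    have := PySem.Dict.nodup_keys_ofList (κ := String) (ν := List (String × Int)) trait_vocabs
    simpa [PySem.Dict.keys, htv, hK] using this
  have hgetK : ∀ p ∈ K, tv.get? p.1 = some p.2 := by
    intro p hp
    exact PySem.Dict.get?_of_mem_items tv hp (PySem.Dict.nodup_keys_ofList trait_vocabs)
  -- ---- A side ----
  have henc0items := pv_init_items K (fun _ => ([] : List Int)) hndK
  set enc0 : PySem.Dict String (List Int) :=
    PySem.Dict.ofList (K.map (fun p => (p.1, ([] : List Int)))) with henc0
  have henc0keys : enc0.keys = K.map (fun q => q.1) := by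
    simp only [PySem.Dict.keys, henc0items, List.map_map, Function.comp_def]
  have henc0getD : ∀ p ∈ K, enc0.getD p.1 [] = [] := by
    intro p hp
    have hmem : (p.1, ([] : List Int)) ∈ enc0.items := by
      rw [henc0items]; exact List.mem_map_of_mem hp
    exact PySem.Dict.getD_of_mem_items enc0 hmem (by rw [henc0keys]; exact hndK) []
  have hsubA : ∀ p ∈ K, p.1 ∈ enc0.keys := by
    intro p hp; rw [henc0keys]; exact List.mem_map_of_mem hp
  set encF := sent.foldl (fun enc token =>
      K.foldl (fun enc p => enc.modify p.1 [] (fun xs => xs ++ [pvEncVal (pvFeats token) p.1 p.2])) enc) enc0 with hencF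
  have hkeysF : encF.keys = K.map (fun q => q.1) := by
    rw [hencF, pv_sent_keys sent K enc0 hsubA, henc0keys]
  have hA : encF.items = K.map (fun p => (p.1, sent.map (fun t => pvEncVal (pvFeats t) p.1 p.2))) := by
    rw [PySem.Dict.items_eq_map_keys encF (by rw [hkeysF]; exact hndK) [], hkeysF, List.map_map]
    apply List.map_congr_left
    intro p hp
    simp only [Function.comp]
    rw [hencF, pv_sent_getD sent K enc0 p hp hndK, henc0getD p hp]
    simp
  -- ---- B side ----
  have hres0items := pv_init_items K (fun _ => List.replicate sent.length (1 : Int)) hndK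
  set res0 : PySem.Dict String (List Int) :=
    PySem.Dict.ofList (K.map (fun p => (p.1, List.replicate sent.length (1 : Int)))) with hres0
  have hres0keys : res0.keys = K.map (fun q => q.1) := by
    simp only [PySem.Dict.keys, hres0items, List.map_map, Function.comp_def]
  have hsubB : ∀ k, tv.contains k = true → k ∈ res0.keys := by
    intro k hc
    rw [hres0keys]
    have : k ∈ tv.keys := (PySem.Dict.contains_iff_mem_keys tv k).mp hc
    simpa [PySem.Dict.keys, hK] using this
  set resF := pvScatterB tv 0 sent res0 with hresF
  have hkeysB : resF.keys = K.map (fun q => q.1) := by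
    rw [hresF, pv_scatterB_keys tv 0 sent res0 hsubB, hres0keys]
  have hB : resF.items = K.map (fun p => (p.1, sent.map (fun t => pvEncVal (pvFeats t) p.1 p.2))) := by
    rw [PySem.Dict.items_eq_map_keys resF (by rw [hkeysB]; exact hndK) [], hkeysB, List.map_map]
    apply List.map_congr_left
    intro p hp
    simp only [Function.comp]
    have hrow0 : res0.getD p.1 [] = [] ++ List.replicate sent.length (1 : Int) := by
      rw [List.nil_append]
      have hmem : (p.1, List.replicate sent.length (1 : Int)) ∈ res0.items := by
        rw [hres0items]; exact List.mem_map_of_mem hp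
      exact PySem.Dict.getD_of_mem_items res0 hmem (by rw [hres0keys]; exact hndK) []
    have := pv_scatterB_row tv p (hgetK p hp) sent res0 [] hrow0
    simpa [hresF] using this
  rw [hA, hB]

-- ===== VERDICT (by name: the statement is the Claim_ definition above) =====
theorem encode_sent_morphs_spec : Claim_equal_encode_sent_morphs := by
  intro sent trait_vocabs _hdom _hpre
  unfold Spec_encode_sent_morphs
  exact pv_ports_eq sent trait_vocabs
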